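-- pv_equiv track=rewrite | github.com/Coding-Crew-Forever/Coding-Test-Study | julia8024/PGS_172927.py | solution
-- ===== SOURCE A (Python) =====
-- def solution(picks, minerals):
--     answer = 0
--     pick_sum = sum(i for i in picks) # 전체 곡괭이 수
--
--     # 캘 수 있는 광물 수
--     min_num = pick_sum * 5
--     minerals = minerals[:min_num] if (min_num) < len(minerals) else minerals
--
--     # 광물 조사
--     new_minerals = [[0,0,0] for _ in range(len(minerals) // 5 + 1)]
--     for i in range(len(minerals)):
--         if minerals[i] == 'diamond':
--             new_minerals[i//5][0] += 1
--         elif minerals[i] == 'iron':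
--             new_minerals[i//5][1] += 1
--         elif minerals[i] == 'stone':
--             new_minerals[i//5][2] += 1
--
--     # 광물의 순서 정렬 : 다이아 > 철 > 돌
--     new_minerals.sort(key=lambda x: (-x[0], -x[1], -x[2]))
--
--     # 정렬된 광물을 다이아 > 철 > 돌 곡괭이 순서로 캐기
--     for i in new_minerals:
--         # ex) [0, 1, 0] -> unwrap
--         diamond, iron, stone = i
--         for j in range(len(picks)):
--             if picks[j] > 0 and j == 0: # 다곡인 경우
--                 picks[j] -= 1
--                 answer += diamond + iron + stone # 피로도 합
--                 break
--             elif picks[j] > 0 and j == 1: # 철곡인 경우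
--                 picks[j] -= 1
--                 answer += (5*diamond) + iron + stone
--                 break
--             elif picks[j] > 0 and j == 2: # 돌곡인 경우
--                 picks[j] -= 1
--                 answer += (25*diamond) + (5*iron) + stone
--                 break
--
--     return answer
-- ===== SOURCE B (Python) =====
-- def solution(picks, minerals):
--     cap = sum(picks) * 5
--     ms = minerals[:cap] if cap < len(minerals) else minerals
--     groups = [[0, 0, 0] for _ in range(len(ms) // 5 + 1)]
--     for i, m in enumerate(ms):
--         if m == 'diamond':
--             groups[i // 5][0] += 1
--         elif m == 'iron':
--             groups[i // 5][1] += 1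
--         elif m == 'stone':
--             groups[i // 5][2] += 1
--     groups.sort(key=lambda g: (-g[0], -g[1], -g[2]))
--     weights = ((1, 1, 1), (5, 1, 1), (25, 5, 1))
--     answer = 0
--     rest = groups
--     for (wd, wi, ws), p in zip(weights, picks):
--         n = max(p, 0)
--         for d, i, s in rest[:n]:
--             answer += wd * d + wi * i + ws * s
--         rest = rest[n:]
--     return answer
-- ===== Notes on version B (the rewrite author's own statement) =====
-- stated objective: simpler
-- what changed: A assigns a pick to each sorted group by scanning and decrementing a mutable picks array inside the per-group loop; B never mutates picks: it walks the three pick types once in priority order and consumes a slice of max(picks[j],0) groups per type, summing with a weight table (zip/slice truncation reproduces surplus picks and surplus groups adding 0).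
import Mathlib
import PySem

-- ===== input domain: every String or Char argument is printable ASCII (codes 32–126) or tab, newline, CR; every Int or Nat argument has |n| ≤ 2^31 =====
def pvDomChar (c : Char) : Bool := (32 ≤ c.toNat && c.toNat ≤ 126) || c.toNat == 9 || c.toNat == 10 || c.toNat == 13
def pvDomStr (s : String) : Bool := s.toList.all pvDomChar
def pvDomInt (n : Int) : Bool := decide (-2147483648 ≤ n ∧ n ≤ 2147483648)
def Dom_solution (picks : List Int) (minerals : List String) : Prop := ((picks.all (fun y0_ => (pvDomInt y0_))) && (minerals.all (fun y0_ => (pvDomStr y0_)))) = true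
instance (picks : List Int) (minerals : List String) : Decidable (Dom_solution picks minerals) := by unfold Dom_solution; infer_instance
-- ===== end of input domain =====

-- B replaces A's per-group scan of the mutable picks array by consuming the sorted groups
-- in pick-priority order with slices and a weight table (objective: simpler, no mutation).
-- NOTE: Python A mutates its `picks` argument in place; B does not. The equivalence proved
-- here is about the RETURN value only.

-- ===== PORT A =====
-- shared preprocessing (identical lines in Source A and Source B): capping, per-5 tally, sort
def pvCap (picks : List Int) (minerals : List String) : List String :=
  let minNum := picks.sum * 5
  if minNum < (minerals.length : Int) then PySem.List.slice minerals none (some minNum)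
  else minerals

def pvTally (ms : List String) : List (Int × Int × Int) :=
  (PySem.List.enumerate ms).foldl (fun gs im =>
    let idx := (PySem.Int.floordiv im.1 5).toNat
    if im.2 = "diamond" then gs.modify idx (fun g => (g.1 + 1, g.2.1, g.2.2))
    else if im.2 = "iron" then gs.modify idx (fun g => (g.1, g.2.1 + 1, g.2.2))
    else if im.2 = "stone" then gs.modify idx (fun g => (g.1, g.2.1, g.2.2 + 1))
    else gs)
    (List.replicate (ms.length / 5 + 1) ((0 : Int), (0 : Int), (0 : Int)))

-- sort(key=lambda x: (-x[0], -x[1], -x[2])): stable insertion sort with the lexicographic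
-- strict-less of the key tuples (PySem.List.sorted's own scheme, cf. sorted_eq_foldl_insertBy)
def pvKeyLt (a b : Int × Int × Int) : Bool :=
  decide (-a.1 < -b.1) || (a.1 == b.1 &&
    (decide (-a.2.1 < -b.2.1) || (a.2.1 == b.2.1 && decide (-a.2.2 < -b.2.2))))

def pvSortGroups (gs : List (Int × Int × Int)) : List (Int × Int × Int) :=
  gs.foldl (fun acc x => PySem.List.insertBy pvKeyLt x acc) []

-- A's inner `for j in range(len(picks)) … break`: first j<3 with picks[j]>0, or none
def pvMineA : List Int → Nat → Int → Int → Int → Option (List Int × Int)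
  | [], _, _, _, _ => none
  | p :: ps, j, diamond, iron, stone =>
    if p > 0 ∧ j = 0 then some ((p - 1) :: ps, diamond + iron + stone)
    else if p > 0 ∧ j = 1 then some ((p - 1) :: ps, 5 * diamond + iron + stone)
    else if p > 0 ∧ j = 2 then some ((p - 1) :: ps, 25 * diamond + 5 * iron + stone)
    else match pvMineA ps (j + 1) diamond iron stone with
      | some (ps', delta) => some (p :: ps', delta)
      | none => none

def pvAFold (gs : List (Int × Int × Int)) (st : List Int × Int) : List Int × Int :=
  gs.foldl (fun st g =>
    match pvMineA st.1 0 g.1 g.2.1 g.2.2 with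
    | some (ps', delta) => (ps', st.2 + delta)
    | none => st) st

def solution (picks : List Int) (minerals : List String) : Int :=
  let ms := pvCap picks minerals
  let newMinerals := pvSortGroups (pvTally ms)
  (pvAFold newMinerals (picks, 0)).2

-- ===== PORT B =====
def solution_alt (picks : List Int) (minerals : List String) : Int :=
  let ms := pvCap picks minerals
  let groups := pvSortGroups (pvTally ms)
  let weights : List (Int × Int × Int) := [(1, 1, 1), (5, 1, 1), (25, 5, 1)]
  ((weights.zip picks).foldl (fun st wp =>
      let n : Int := max wp.2 0
      ((PySem.List.slice st.2 none (some n)).foldl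
          (fun a g => a + (wp.1.1 * g.1 + wp.1.2.1 * g.2.1 + wp.1.2.2 * g.2.2)) st.1,
        PySem.List.slice st.2 (some n) none))
    ((0 : Int), groups)).1

-- ===== PRECONDITION & SPEC =====
def Spec_solution (picks : List Int) (minerals : List String) (out : Int) : Prop := out = solution_alt picks minerals
instance (picks : List Int) (minerals : List String) (out : Int) : Decidable (Spec_solution picks minerals out) := by unfold Spec_solution; infer_instance

-- ===== CLAIM (what is proved, stated in full; the proofs are below) =====
def Claim_equal_solution : Prop := ∀ (picks : List Int) (minerals : List String), Dom_solution picks minerals → Spec_solution picks minerals (solution picks minerals)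

-- ===== LEMMAS AND PROOFS =====

def pvN (p : Int) : Nat := (max p 0).toNat

def pvCS (w : Int × Int × Int) (l : List (Int × Int × Int)) : Int :=
  (l.map (fun g => w.1 * g.1 + w.2.1 * g.2.1 + w.2.2 * g.2.2)).sum

lemma pvMineA_none_of_ge3 (ps : List Int) (j : Nat) (d i s : Int) (h : 3 ≤ j) :
    pvMineA ps j d i s = none := by
  induction ps generalizing j with
  | nil => rfl
  | cons p ps ih =>
    simp only [pvMineA]
    rw [if_neg (by omega), if_neg (by omega), if_neg (by omega), ih (j + 1) (by omega)]

lemma pvN_pos (a : Int) (h : 0 < a) : pvN a = pvN (a - 1) + 1 := by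
  simp only [pvN]; omega

lemma pvN_nonpos (a : Int) (h : a ≤ 0) : pvN a = 0 := by
  simp only [pvN]; omega

lemma pvCS_cons (w g : Int × Int × Int) (l : List (Int × Int × Int)) :
    pvCS w (g :: l) = (w.1 * g.1 + w.2.1 * g.2.1 + w.2.2 * g.2.2) + pvCS w l := by
  simp [pvCS]

lemma pvA0 (gs : List (Int × Int × Int)) (acc : Int) :
    pvAFold gs ([], acc) = ([], acc) := by
  induction gs with
  | nil => rfl
  | cons g gs ih => simpa [pvAFold, pvMineA] using ih

lemma pvA1 (gs : List (Int × Int × Int)) (a acc : Int) :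
    (pvAFold gs ([a], acc)).2 = acc + pvCS (1, 1, 1) (gs.take (pvN a)) := by
  induction gs generalizing a acc with
  | nil => simp [pvAFold, pvCS]
  | cons g gs ih =>
    by_cases ha : 0 < a
    · rw [pvN_pos a ha, List.take_succ_cons, pvCS_cons]
      have : pvAFold (g :: gs) ([a], acc)
          = pvAFold gs ([a - 1], acc + (g.1 + g.2.1 + g.2.2)) := by
        simp [pvAFold, pvMineA, ha]
      rw [this, ih]; ring
    · rw [pvN_nonpos a (by omega), List.take_zero, pvCS]
      have : pvAFold (g :: gs) ([a], acc) = pvAFold gs ([a], acc) := by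
        simp [pvAFold, pvMineA, ha]
      rw [this, ih, pvN_nonpos a (by omega), List.take_zero, pvCS]

lemma pvA2 (gs : List (Int × Int × Int)) (a b acc : Int) :
    (pvAFold gs ([a, b], acc)).2
      = acc + pvCS (1, 1, 1) (gs.take (pvN a))
            + pvCS (5, 1, 1) ((gs.drop (pvN a)).take (pvN b)) := by
  induction gs generalizing a b acc with
  | nil => simp [pvAFold, pvCS]
  | cons g gs ih =>
    by_cases ha : 0 < a
    · rw [pvN_pos a ha, List.take_succ_cons, List.drop_succ_cons, pvCS_cons]
      have : pvAFold (g :: gs) ([a, b], acc)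
          = pvAFold gs ([a - 1, b], acc + (g.1 + g.2.1 + g.2.2)) := by
        simp [pvAFold, pvMineA, ha]
      rw [this, ih]; ring
    · rw [pvN_nonpos a (by omega), List.take_zero, List.drop_zero]
      by_cases hb : 0 < b
      · rw [pvN_pos b hb, List.take_succ_cons, pvCS_cons]
        have : pvAFold (g :: gs) ([a, b], acc)
            = pvAFold gs ([a, b - 1], acc + (5 * g.1 + g.2.1 + g.2.2)) := by
          simp [pvAFold, pvMineA, ha, hb]
        rw [this, ih, pvN_nonpos a (by omega), List.take_zero, List.drop_zero, pvCS]
        simp [pvCS]; ring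
      · have : pvAFold (g :: gs) ([a, b], acc) = pvAFold gs ([a, b], acc) := by
          simp [pvAFold, pvMineA, ha, hb]
        rw [this, ih, pvN_nonpos a (by omega), pvN_nonpos b (by omega)]
        simp [pvCS]

lemma pvA3 (gs : List (Int × Int × Int)) (a b c : Int) (t : List Int) (acc : Int) :
    (pvAFold gs (a :: b :: c :: t, acc)).2
      = acc + pvCS (1, 1, 1) (gs.take (pvN a))
            + pvCS (5, 1, 1) ((gs.drop (pvN a)).take (pvN b))
            + pvCS (25, 5, 1) (((gs.drop (pvN a)).drop (pvN b)).take (pvN c)) := by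
  induction gs generalizing a b c acc with
  | nil => simp [pvAFold, pvCS]
  | cons g gs ih =>
    by_cases ha : 0 < a
    · rw [pvN_pos a ha, List.take_succ_cons, List.drop_succ_cons, pvCS_cons]
      have : pvAFold (g :: gs) (a :: b :: c :: t, acc)
          = pvAFold gs ((a - 1) :: b :: c :: t, acc + (g.1 + g.2.1 + g.2.2)) := by
        simp [pvAFold, pvMineA, ha]
      rw [this, ih]; ring
    · rw [pvN_nonpos a (by omega), List.take_zero, List.drop_zero]
      by_cases hb : 0 < b
      · rw [pvN_pos b hb, List.take_succ_cons, List.drop_succ_cons, pvCS_cons]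
        have : pvAFold (g :: gs) (a :: b :: c :: t, acc)
            = pvAFold gs (a :: (b - 1) :: c :: t, acc + (5 * g.1 + g.2.1 + g.2.2)) := by
          simp [pvAFold, pvMineA, ha, hb]
        rw [this, ih, pvN_nonpos a (by omega), List.take_zero, List.drop_zero, pvCS]
        simp [pvCS]; ring
      · by_cases hc : 0 < c
        · rw [pvN_nonpos b (by omega), List.take_zero, List.drop_zero,
            pvN_pos c hc, List.take_succ_cons, pvCS_cons]
          have : pvAFold (g :: gs) (a :: b :: c :: t, acc)
              = pvAFold gs (a :: b :: (c - 1) :: t,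
                  acc + (25 * g.1 + 5 * g.2.1 + g.2.2)) := by
            simp [pvAFold, pvMineA, ha, hb, hc]
          rw [this, ih, pvN_nonpos a (by omega), List.take_zero, List.drop_zero,
            pvN_nonpos b (by omega), List.take_zero, List.drop_zero, pvCS]
          simp [pvCS]; ring
        · have : pvAFold (g :: gs) (a :: b :: c :: t, acc)
              = pvAFold gs (a :: b :: c :: t, acc) := by
            simp [pvAFold, pvMineA, ha, hb, hc,
              pvMineA_none_of_ge3 t 3 g.1 g.2.1 g.2.2 (by omega)]
          rw [this, ih, pvN_nonpos a (by omega), pvN_nonpos b (by omega),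
            pvN_nonpos c (by omega)]
          simp [pvCS]

lemma pvChunk (w1 w2 w3 p st : Int) (gs : List (Int × Int × Int)) :
    (PySem.List.slice gs none (some (max p 0))).foldl
        (fun a g => a + (w1 * g.1 + w2 * g.2.1 + w3 * g.2.2)) st
      = st + pvCS (w1, w2, w3) (gs.take (pvN p)) := by
  rw [PySem.List.slice_to gs (le_max_right p 0), PySem.List.foldl_add]
  rfl

lemma pvRestEq (p : Int) (gs : List (Int × Int × Int)) :
    PySem.List.slice gs (some (max p 0)) none = gs.drop (pvN p) := by
  rw [PySem.List.slice_from gs (le_max_right p 0)]; rfl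

-- ===== VERDICT (by name: the statement is the Claim_ definition above) =====
theorem solution_spec : Claim_equal_solution := by
  intro picks minerals _
  unfold Spec_solution solution solution_alt
  match picks with
  | [] =>
    simp [pvA0]
  | [a] =>
    rw [pvA1]
    simp only [List.zip_cons_cons, List.zip_nil_right, List.foldl_cons, List.foldl_nil]
    rw [pvChunk]
  | [a, b] =>
    rw [pvA2]
    simp only [List.zip_cons_cons, List.zip_nil_right, List.foldl_cons, List.foldl_nil]
    rw [pvChunk, pvRestEq, pvChunk]
  | a :: b :: c :: t =>
    rw [pvA3]
    simp only [List.zip_cons_cons, List.zip_nil_left, List.foldl_cons, List.foldl_nil]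
    rw [pvChunk, pvRestEq, pvChunk, pvRestEq, pvChunk]
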